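-- pv_equiv track=rewrite | github.com/NildaX/IFS_1 | IFS_1.py | get_coor
-- ===== SOURCE A (Python) =====
-- def get_coor(x,y,radius):
--     pix_x = []
--     pix_y = []
--     k = 1
--     r = 1
--     num = ((radius*2)+1)
--     for i in range(int(num/2)+1):
--         k = 1
--         while k <= r:
--             dif = (k-1) - i
--           #  if 0 < (x+dif) < tam_x and 0 < (y+radius-i) < tam_y:
--             pix_x.append(x+dif)
--             pix_y.append(y+radius-i)
--             k = k+1
--         r += 2
--
--     r = ((radius*2)+1)-2
--     i = i+1
--     l = 0
--     for j in range(int(num/2)):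
--         k = 1
--         while k <= r:
--        #     if 0 < (x-radius+k+l) < tam_x and 0 < (y+radius-i) < tam_y:
--            pix_x.append(x-radius+k+l)
--            pix_y.append(y+radius-i)
--            k = k+1
--
--         r = r-2
--         i = i+1
--         l = l+1
--
--     return pix_x,pix_y
-- ===== SOURCE B (Python) =====
-- def get_coor(x, y, radius):
--     pix_x = []
--     pix_y = []
--     for dy in range(radius, -radius - 1, -1):
--         w = radius - abs(dy)
--         for dx in range(-w, w + 1):
--             pix_x.append(x + dx)
--             pix_y.append(y + dy)
--     return pix_x, pix_y
-- ===== Notes on version B (the rewrite author's own statement) =====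
-- stated objective: simpler
-- what changed: Replaced A's two triangular passes with incrementing/decrementing row-width bookkeeping (k, r, l, leftover i) by one nested loop over dy from radius to -radius with closed-form half-width w = radius - abs(dy), emitting the same points in the same order.
-- intended difference: For radius = -1 A returns ([x], [y-1]) — a stray point produced by leftover loop state (its first loop still runs once with stale width) — while B returns ([], []), the intended empty diamond for a negative radius. — e.g. on get_coor(10, 20, -1): A returns ([10], [19]), B returns ([], [])
import Mathlib
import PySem

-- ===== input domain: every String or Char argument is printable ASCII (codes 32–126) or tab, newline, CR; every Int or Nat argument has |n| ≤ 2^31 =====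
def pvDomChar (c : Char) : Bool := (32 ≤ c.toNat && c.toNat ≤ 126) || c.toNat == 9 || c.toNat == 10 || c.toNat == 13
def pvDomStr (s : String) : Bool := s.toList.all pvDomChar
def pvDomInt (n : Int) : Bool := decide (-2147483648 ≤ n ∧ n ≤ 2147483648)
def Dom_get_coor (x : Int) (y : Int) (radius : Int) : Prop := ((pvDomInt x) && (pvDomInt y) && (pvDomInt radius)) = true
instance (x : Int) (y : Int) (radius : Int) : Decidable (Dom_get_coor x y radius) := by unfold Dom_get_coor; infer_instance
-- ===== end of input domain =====

-- B replaces A's two triangular passes with incrementing/decrementing r/l bookkeeping by one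
-- loop over dy with closed-form half-width w = radius - |dy| (objective: simpler; same point order).
-- A raises UnboundLocalError for radius ≤ -2 (excluded by Pre_); for radius = -1 A returns a
-- stray leftover-state point — stated as intended difference D_ below.

-- ===== PORT A =====
-- first while loop: while k <= r: append x+((k-1)-i), yv; k += 1   (fuel = iterations left)
def pvA_while1 (x : Int) (yv : Int) (i : Int) (fuel : Nat) (k : Int) (r : Int)
    (st : List Int × List Int) : List Int × List Int :=
  match fuel with
  | 0 => st
  | fuel + 1 =>
      if k ≤ r then
        pvA_while1 x yv i fuel (k + 1) r (st.1 ++ [x + ((k - 1) - i)], st.2 ++ [yv])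
      else st

-- second while loop: while k <= r: append x-radius+k+l, yv; k += 1
def pvA_while2 (x : Int) (radius : Int) (l : Int) (yv : Int) (fuel : Nat) (k : Int) (r : Int)
    (st : List Int × List Int) : List Int × List Int :=
  match fuel with
  | 0 => st
  | fuel + 1 =>
      if k ≤ r then
        pvA_while2 x radius l yv fuel (k + 1) r (st.1 ++ [x - radius + k + l], st.2 ++ [yv])
      else st

def get_coor (x : Int) (y : Int) (radius : Int) : List Int × List Int :=
  let num : Int := radius * 2 + 1
  let half : Int := PySem.Int.truncdiv num 2          -- int(num/2)
  -- for i in range(int(num/2)+1): k=1; while k<=r: …; r += 2     (state: (r, pix))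
  let s1 : Int × (List Int × List Int) :=
    (PySem.List.pyRange 0 (half + 1) 1).foldl
      (fun acc i => (acc.1 + 2, pvA_while1 x (y + radius - i) i (acc.1 + 1 - 1).toNat 1 acc.1 acc.2))
      (1, ([], []))
  -- r = num - 2; i = i + 1 (= half + 1, Pre_ guarantees the first loop ran); l = 0
  -- for j in range(int(num/2)): while k<=r: …; r -= 2; i += 1; l += 1   (state: (r, i, l, pix))
  let s2 : Int × Int × Int × (List Int × List Int) :=
    (PySem.List.pyRange 0 half 1).foldl
      (fun acc _j =>
        (acc.1 - 2, acc.2.1 + 1, acc.2.2.1 + 1,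
         pvA_while2 x radius acc.2.2.1 (y + radius - acc.2.1) (acc.1 + 1 - 1).toNat 1 acc.1 acc.2.2.2))
      (num - 2, half + 1, 0, s1.2)
  s2.2.2.2

-- ===== PORT B =====
def get_coor_alt (x : Int) (y : Int) (radius : Int) : List Int × List Int :=
  (PySem.List.pyRange radius (-radius - 1) (-1)).foldl
    (fun st dy =>
      let w : Int := radius - |dy|
      (PySem.List.pyRange (-w) (w + 1) 1).foldl
        (fun st2 dx => (st2.1 ++ [x + dx], st2.2 ++ [y + dy])) st)
    ([], [])

-- ===== PRECONDITION & SPEC =====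
-- Pre_ excludes radius ≤ -2, where A raises UnboundLocalError (its first loop never runs, leaving i unbound).
def Pre_get_coor (x : Int) (y : Int) (radius : Int) : Prop := -1 ≤ radius
instance (x : Int) (y : Int) (radius : Int) : Decidable (Pre_get_coor x y radius) := by
  unfold Pre_get_coor; infer_instance
def pvWitness_get_coor : Int × Int × Int := (10, 20, 2)

-- For radius = -1 A returns ([x], [y-1]) — a stray point from leftover loop state — while B
-- returns ([], []), the intended empty diamond for a negative radius.
def D_get_coor (x : Int) (y : Int) (radius : Int) : Prop := radius = -1
instance (x : Int) (y : Int) (radius : Int) : Decidable (D_get_coor x y radius) := by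
  unfold D_get_coor; infer_instance

def Spec_get_coor (x : Int) (y : Int) (radius : Int) (out : List Int × List Int) : Prop :=
  ¬ D_get_coor x y radius → out = get_coor_alt x y radius
instance (x : Int) (y : Int) (radius : Int) (out : List Int × List Int) :
    Decidable (Spec_get_coor x y radius out) := by unfold Spec_get_coor; infer_instance

def pvDiffWitness_get_coor : Int × Int × Int := (10, 20, -1)
def pvDiffWitnessOut_get_coor : (List Int × List Int) × (List Int × List Int) :=
  (([10], [19]), ([], []))

-- ===== CLAIM (what is proved, stated in full; the proofs are below) =====
def Claim_unchanged_get_coor : Prop := ∀ (x : Int) (y : Int) (radius : Int),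
  Dom_get_coor x y radius → Pre_get_coor x y radius → Spec_get_coor x y radius (get_coor x y radius)
def Claim_changed_get_coor : Prop :=
  Dom_get_coor (pvDiffWitness_get_coor.1) (pvDiffWitness_get_coor.2.1) (pvDiffWitness_get_coor.2.2) ∧
  Pre_get_coor (pvDiffWitness_get_coor.1) (pvDiffWitness_get_coor.2.1) (pvDiffWitness_get_coor.2.2) ∧
  D_get_coor (pvDiffWitness_get_coor.1) (pvDiffWitness_get_coor.2.1) (pvDiffWitness_get_coor.2.2) ∧
  get_coor (pvDiffWitness_get_coor.1) (pvDiffWitness_get_coor.2.1) (pvDiffWitness_get_coor.2.2) = pvDiffWitnessOut_get_coor.1 ∧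
  get_coor_alt (pvDiffWitness_get_coor.1) (pvDiffWitness_get_coor.2.1) (pvDiffWitness_get_coor.2.2) = pvDiffWitnessOut_get_coor.2 ∧
  pvDiffWitnessOut_get_coor.1 ≠ pvDiffWitnessOut_get_coor.2
def Claim_exact_get_coor : Prop := ∀ (x : Int) (y : Int) (radius : Int),
  Dom_get_coor x y radius → Pre_get_coor x y radius → D_get_coor x y radius →
  get_coor x y radius ≠ get_coor_alt x y radius

-- ===== LEMMAS AND PROOFS =====

-- canonical row fold: for each dy append the row of half-width radius - |dy| (B's shape)
def pvRows (x : Int) (y : Int) (radius : Int) (dys : List Int) (st : List Int × List Int) :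
    List Int × List Int :=
  dys.foldl
    (fun st dy =>
      (st.1 ++ (PySem.List.pyRange (-(radius - |dy|)) ((radius - |dy|) + 1) 1).map (fun dx => x + dx),
       st.2 ++ (PySem.List.pyRange (-(radius - |dy|)) ((radius - |dy|) + 1) 1).map (fun _ => y + dy)))
    st

lemma pv_pairFold (f g : Int → Int) : ∀ (l : List Int) (st : List Int × List Int),
    l.foldl (fun st2 e => (st2.1 ++ [f e], st2.2 ++ [g e])) st = (st.1 ++ l.map f, st.2 ++ l.map g) := by
  intro l
  induction l with
  | nil => intro st; simp
  | cons a tl ih => intro st; simp [List.foldl_cons, ih]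

lemma pv_B_rows (x y radius : Int) :
    get_coor_alt x y radius = pvRows x y radius (PySem.List.pyRange radius (-radius - 1) (-1)) ([], []) := by
  unfold get_coor_alt pvRows
  congr 1
  funext st dy
  simp only []
  rw [pv_pairFold (fun dx => x + dx) (fun _ => y + dy)]

lemma pv_while1_eq (x yv i : Int) : ∀ (fuel : Nat) (k r : Int) (st : List Int × List Int),
    fuel = (r + 1 - k).toNat →
    pvA_while1 x yv i fuel k r st =
      (st.1 ++ (PySem.List.pyRange k (r + 1) 1).map (fun kk => x + ((kk - 1) - i)),
       st.2 ++ (PySem.List.pyRange k (r + 1) 1).map (fun _ => yv)) := by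
  intro fuel
  induction fuel with
  | zero =>
    intro k r st hf
    rw [PySem.List.pyRange_one_eq_nil (by omega)]
    simp [pvA_while1]
  | succ n ih =>
    intro k r st hf
    have hkr : k ≤ r := by omega
    rw [PySem.List.pyRange_one_cons (by omega)]
    simp only [pvA_while1, if_pos hkr]
    rw [ih (k+1) r _ (by omega)]
    simp

lemma pv_while2_eq (x radius l yv : Int) : ∀ (fuel : Nat) (k r : Int) (st : List Int × List Int),
    fuel = (r + 1 - k).toNat →
    pvA_while2 x radius l yv fuel k r st =
      (st.1 ++ (PySem.List.pyRange k (r + 1) 1).map (fun kk => x - radius + kk + l),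
       st.2 ++ (PySem.List.pyRange k (r + 1) 1).map (fun _ => yv)) := by
  intro fuel
  induction fuel with
  | zero =>
    intro k r st hf
    rw [PySem.List.pyRange_one_eq_nil (by omega)]
    simp [pvA_while2]
  | succ n ih =>
    intro k r st hf
    have hkr : k ≤ r := by omega
    rw [PySem.List.pyRange_one_cons (by omega)]
    simp only [pvA_while2, if_pos hkr]
    rw [ih (k+1) r _ (by omega)]
    simp

lemma pv_loop1_eq (x y radius : Int) : ∀ (n : Nat) (a : Int) (st : List Int × List Int),
    (PySem.List.pyRange a (a + n) 1).foldl
      (fun acc i => (acc.1 + 2, pvA_while1 x (y + radius - i) i (acc.1 + 1 - 1).toNat 1 acc.1 acc.2))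
      (2 * a + 1, st)
    = (2 * (a + n) + 1,
       (PySem.List.pyRange a (a + n) 1).foldl
         (fun st i =>
           (st.1 ++ (PySem.List.pyRange 1 (2 * i + 2) 1).map (fun kk => x + ((kk - 1) - i)),
            st.2 ++ (PySem.List.pyRange 1 (2 * i + 2) 1).map (fun _ => y + radius - i))) st) := by
  intro n
  induction n with
  | zero =>
    intro a st
    rw [show a + ((0:Nat):Int) = a by push_cast; ring]
    rw [PySem.List.pyRange_one_eq_nil (by omega)]
    simp
  | succ n ih =>
    intro a st
    rw [show a + ((n+1:Nat):Int) = (a+1) + (n:Int) by push_cast; ring]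
    rw [PySem.List.pyRange_one_cons (by omega)]
    simp only [List.foldl_cons]
    rw [pv_while1_eq x (y + radius - a) a _ 1 (2*a+1) st (by omega)]
    rw [show 2*a+1+2 = 2*(a+1)+1 by ring]
    rw [ih (a+1)]
    rw [show (2*a+1+1 : Int) = 2*a+2 by ring]

lemma pv_loop2_eq (x y radius : Int) : ∀ (n : Nat) (t : Int) (st : List Int × List Int),
    (PySem.List.pyRange t (t + n) 1).foldl
      (fun acc _j =>
        (acc.1 - 2, acc.2.1 + 1, acc.2.2.1 + 1,
         pvA_while2 x radius acc.2.2.1 (y + radius - acc.2.1) (acc.1 + 1 - 1).toNat 1 acc.1 acc.2.2.2))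
      (2 * radius - 1 - 2 * t, radius + 1 + t, t, st)
    = (2 * radius - 1 - 2 * (t + n), radius + 1 + t + n, t + n,
       (PySem.List.pyRange t (t + n) 1).foldl
         (fun st j =>
           (st.1 ++ (PySem.List.pyRange 1 (2 * (radius - j)) 1).map (fun kk => x - radius + kk + j),
            st.2 ++ (PySem.List.pyRange 1 (2 * (radius - j)) 1).map (fun _ => y - 1 - j))) st) := by
  intro n
  induction n with
  | zero =>
    intro t st
    rw [show t + ((0:Nat):Int) = t by push_cast; ring]
    rw [PySem.List.pyRange_one_eq_nil (by omega)]
    simp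
  | succ n ih =>
    intro t st
    rw [show t + ((n+1:Nat):Int) = (t+1) + (n:Int) by push_cast; ring]
    rw [PySem.List.pyRange_one_cons (by omega)]
    simp only [List.foldl_cons]
    rw [pv_while2_eq x radius t (y + radius - (radius + 1 + t)) _ 1 (2*radius-1-2*t) st (by omega)]
    rw [show 2*radius-1-2*t-2 = 2*radius-1-2*(t+1) by ring,
        show radius+1+t+1 = radius+1+(t+1) by ring]
    rw [ih (t+1)]
    rw [show (2*radius-1-2*t+1 : Int) = 2*(radius - t) by ring,
        show y + radius - (radius + 1 + t) = y - 1 - t by ring]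
    have : radius + 1 + (t + 1) + (n:Int) = radius + 1 + t + ((n:Nat)+1:Nat) := by push_cast; ring
    rw [this]

lemma pv_rowsA_toP (x y radius : Int) : ∀ (is : List Int) (st : List Int × List Int),
    (∀ i ∈ is, 0 ≤ i ∧ i ≤ radius) →
    is.foldl
      (fun st i =>
        (st.1 ++ (PySem.List.pyRange 1 (2 * i + 2) 1).map (fun kk => x + ((kk - 1) - i)),
         st.2 ++ (PySem.List.pyRange 1 (2 * i + 2) 1).map (fun _ => y + radius - i))) st
    = pvRows x y radius (is.map (fun i => radius - i)) st := by
  intro is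
  induction is with
  | nil => intro st _; simp [pvRows]
  | cons i tl ih =>
    intro st hmem
    obtain ⟨hi0, hir⟩ := hmem i (by simp)
    simp only [List.foldl_cons, List.map_cons, pvRows] at *
    rw [ih _ (fun j hj => hmem j (by simp [hj]))]
    have habs : radius - |radius - i| = i := by rw [abs_of_nonneg (by omega)]; ring
    rw [habs]
    congr 2
    · congr 1
      rw [PySem.List.pyRange_one, PySem.List.pyRange_one, List.map_map, List.map_map]
      rw [show ((2*i+2) - 1).toNat = (i + 1 - -i).toNat by omega]
      apply List.map_congr_left
      intro t _
      simp only [Function.comp_apply]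
      ring
    · congr 1
      rw [PySem.List.pyRange_one, PySem.List.pyRange_one, List.map_map, List.map_map]
      rw [show ((2*i+2) - 1).toNat = (i + 1 - -i).toNat by omega]
      apply List.map_congr_left
      intro t _
      simp only [Function.comp_apply]
      ring

lemma pv_rowsA2_toP (x y radius : Int) : ∀ (js : List Int) (st : List Int × List Int),
    (∀ j ∈ js, 0 ≤ j ∧ j ≤ radius - 1) →
    js.foldl
      (fun st j =>
        (st.1 ++ (PySem.List.pyRange 1 (2 * (radius - j)) 1).map (fun kk => x - radius + kk + j),
         st.2 ++ (PySem.List.pyRange 1 (2 * (radius - j)) 1).map (fun _ => y - 1 - j))) st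
    = pvRows x y radius (js.map (fun j => -1 - j)) st := by
  intro js
  induction js with
  | nil => intro st _; simp [pvRows]
  | cons j tl ih =>
    intro st hmem
    obtain ⟨hj0, hjr⟩ := hmem j (by simp)
    simp only [List.foldl_cons, List.map_cons, pvRows] at *
    rw [ih _ (fun u hu => hmem u (by simp [hu]))]
    have habs : radius - |(-1 : Int) - j| = radius - 1 - j := by
      rw [show |(-1 : Int) - j| = 1 + j by rw [abs_of_nonpos (by omega)]; ring]; ring
    rw [habs]
    congr 2
    · congr 1
      rw [PySem.List.pyRange_one, PySem.List.pyRange_one, List.map_map, List.map_map]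
      rw [show ((2*(radius - j)) - 1).toNat = ((radius - 1 - j) + 1 - -(radius - 1 - j)).toNat by omega]
      apply List.map_congr_left
      intro t _
      simp only [Function.comp_apply]
      ring
    · congr 1
      rw [PySem.List.pyRange_one, PySem.List.pyRange_one, List.map_map, List.map_map]
      rw [show ((2*(radius - j)) - 1).toNat = ((radius - 1 - j) + 1 - -(radius - 1 - j)).toNat by omega]
      apply List.map_congr_left
      intro t _
      simp only [Function.comp_apply]
      ring

lemma pv_dys (radius : Int) (h : 0 ≤ radius) :
    (PySem.List.pyRange 0 (radius + 1) 1).map (fun i => radius - i)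
      ++ (PySem.List.pyRange 0 radius 1).map (fun j => -1 - j)
    = PySem.List.pyRange radius (-radius - 1) (-1) := by
  rw [PySem.List.pyRange_neg_one, PySem.List.pyRange_one, PySem.List.pyRange_one]
  rw [show (radius - (-radius - 1)).toNat = (radius + 1 - 0).toNat + (radius - 0).toNat by omega]
  rw [List.range_add, List.map_append, List.map_map, List.map_map, List.map_map]
  congr 1
  · apply List.map_congr_left
    intro t _
    simp only [Function.comp_apply]
    ring
  · apply List.map_congr_left
    intro t _
    simp only [Function.comp_apply]
    have : (((radius + 1 - 0).toNat : Nat) : Int) = radius + 1 := by omega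
    push_cast
    rw [this]
    ring

lemma pv_main (x y radius : Int) (h : 0 ≤ radius) : get_coor x y radius = get_coor_alt x y radius := by
  have hhalf : PySem.Int.truncdiv (radius * 2 + 1) 2 = radius := by
    simp only [PySem.Int.truncdiv, Int.tdiv_eq_ediv]; omega
  rw [pv_B_rows]
  simp only [get_coor, hhalf]
  have e1 := pv_loop1_eq x y radius (radius + 1).toNat 0 ([], [])
  rw [show ((0:Int) + ((radius + 1).toNat : Int)) = radius + 1 by omega] at e1
  rw [show (2 * (0:Int) + 1) = 1 by ring] at e1
  rw [e1]
  have e2 := pv_loop2_eq x y radius radius.toNat 0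
  rw [show ((0:Int) + (radius.toNat : Int)) = radius by omega] at e2
  rw [show (2 * radius - 1 - 2 * (0:Int)) = 2 * radius - 1 by ring] at e2
  rw [show (radius + 1 + (0:Int)) = radius + 1 by ring] at e2
  rw [show (radius * 2 + 1 - 2 : Int) = 2 * radius - 1 by ring]
  rw [e2]
  dsimp only
  rw [pv_rowsA_toP x y radius _ _
        (fun i hi => by rw [PySem.List.mem_pyRange_one] at hi; omega)]
  rw [pv_rowsA2_toP x y radius _ _
        (fun j hj => by rw [PySem.List.mem_pyRange_one] at hj; omega)]
  unfold pvRows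
  rw [← List.foldl_append]
  rw [pv_dys radius h]

-- ===== VERDICT (by name: the statement is the Claim_ definition above) =====
theorem get_coor_spec : Claim_unchanged_get_coor := by
  intro x y radius _ hpre hnd
  unfold Pre_get_coor at hpre
  unfold D_get_coor at hnd
  exact pv_main x y radius (by omega)

theorem get_coor_changed : Claim_changed_get_coor := by
  unfold Claim_changed_get_coor; decide

theorem get_coor_tight : Claim_exact_get_coor := by
  intro x y radius _ _ hd
  unfold D_get_coor at hd
  subst hd
  simp [get_coor, get_coor_alt, PySem.Int.truncdiv, PySem.List.pyRange, pvA_while1]
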